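-- pv_equiv track=rewrite | github.com/highwayns/vibesdk | docs/excel_to_markdown.py | trim_grid
-- ===== SOURCE A (Python) =====
-- from typing import Any, Dict, Iterable, List, Optional, Sequence, Tuple
--
-- def is_blank(v: Any) -> bool:
--     if v is None:
--         return True
--     if isinstance(v, str) and v.strip() == "":
--         return True
--     return False
--
-- def trim_grid(grid: List[List[str]]) -> List[List[str]]:
--     if not grid:
--         return grid
--     rows = [r for r in grid if any(not is_blank(c) for c in r)]
--     if not rows:
--         return []
--     maxc = max(len(r) for r in rows)
--     rows = [r + [""] * (maxc - len(r)) for r in rows]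
--     non_empty_cols = [any(not is_blank(rows[r][c]) for r in range(len(rows))) for c in range(maxc)]
--     if any(non_empty_cols):
--         kept_idx = [i for i, ok in enumerate(non_empty_cols) if ok]
--         rows = [[row[i] for i in kept_idx] for row in rows]
--     while rows and rows[0]:
--         last = len(rows[0]) - 1
--         if all(is_blank(r[last]) for r in rows):
--             rows = [r[:-1] for r in rows]
--         else:
--             break
--     return rows
-- ===== SOURCE B (Python) =====
-- def trim_grid(grid):
--     if not grid:
--         return grid
--     keep_rows = []
--     cols = set()
--     for i, row in enumerate(grid):
--         found = False
--         for j, cell in enumerate(row):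
--             if cell.strip() != "":
--                 found = True
--                 cols.add(j)
--         if found:
--             keep_rows.append(i)
--     if not keep_rows:
--         return []
--     kept_cols = sorted(cols)
--     return [[grid[i][j] if j < len(grid[i]) else "" for j in kept_cols] for i in keep_rows]
-- ===== Notes on version B (the rewrite author's own statement) =====
-- stated objective: alternative
-- what changed: B makes a single scan over the cells collecting the set of column indices holding a non-blank cell and the list of non-blank row indices, then builds the result directly by projecting the original grid onto sorted(cols) with an inline pad, instead of A's staged pipeline (row filter, padded copy, boolean column mask with index projection, trailing while loop).
import Mathlib
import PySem

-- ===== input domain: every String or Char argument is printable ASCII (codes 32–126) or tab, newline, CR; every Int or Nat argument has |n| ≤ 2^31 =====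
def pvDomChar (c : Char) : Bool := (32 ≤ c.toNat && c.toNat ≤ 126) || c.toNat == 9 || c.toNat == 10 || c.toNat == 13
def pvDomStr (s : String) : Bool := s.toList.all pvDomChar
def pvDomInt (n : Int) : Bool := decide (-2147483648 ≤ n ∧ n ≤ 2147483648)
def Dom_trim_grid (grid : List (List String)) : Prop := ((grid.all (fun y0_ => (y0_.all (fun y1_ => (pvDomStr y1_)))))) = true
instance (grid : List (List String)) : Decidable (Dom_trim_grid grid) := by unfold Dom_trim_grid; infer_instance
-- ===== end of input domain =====

-- B replaces A's staged pipeline (row filter, padded copy, boolean column mask + index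
-- projection, trailing while loop) by ONE scan over the cells collecting the set of
-- non-blank column indices and the list of non-blank row indices, then projects the
-- original grid onto sorted(cols) directly; objective: alternative (same cost).
-- Return-value equivalence only (neither version mutates its argument).

-- ===== PORT A =====
-- is_blank for the str cells this function receives (the None branch is unreachable on List String)
def isBlank (v : String) : Bool := PySem.Str.strip v == ""

-- the trailing `while rows and rows[0]: …` loop of A; fuel = len(rows[0]) bounds its iterations
def trimLoopA : Nat → List (List String) → List (List String)
  | 0, rows => rows
  | n + 1, rows =>
    if !rows.isEmpty && !(rows.headD []).isEmpty then
      let last := (rows.headD []).length - 1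
      if rows.all (fun r => isBlank (r.getD last "")) then
        trimLoopA n (rows.map (fun r => r.dropLast))
      else rows
    else rows

def trim_grid (grid : List (List String)) : List (List String) :=
  if grid.isEmpty then grid
  else
    let rows := grid.filter (fun r => r.any (fun c => !(isBlank c)))
    if rows.isEmpty then []
    else
      let maxc := ((rows.map List.length).max?).getD 0
      let rows2 := rows.map (fun r => r ++ List.replicate (maxc - r.length) "")
      let nonEmptyCols := (List.range maxc).map
        (fun c => (List.range rows2.length).any (fun r => !(isBlank ((rows2.getD r []).getD c ""))))
      let rows3 :=
        if nonEmptyCols.any id then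
          let keptIdx := ((nonEmptyCols.zipIdx 0).filter (fun p => p.1)).map (fun p => p.2)
          rows2.map (fun row => keptIdx.map (fun i => row.getD i ""))
        else rows2
      trimLoopA (rows3.headD []).length rows3

-- ===== PORT B =====
-- cell.strip() != ""
def cellNB (c : String) : Bool := !(PySem.Str.strip c == "")

def trim_grid_alt (grid : List (List String)) : List (List String) :=
  if grid.isEmpty then grid
  else
    -- for i, row in enumerate(grid): inner scan sets found and adds non-blank column
    -- indices to the set `cols`; afterwards keep_rows collects i for rows with found
    let st := (PySem.List.enumerate grid 0).foldl
      (fun (st : List Int × PySem.Set Int) p =>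
        let inner := (PySem.List.enumerate p.2 0).foldl
          (fun (q : Bool × PySem.Set Int) pc =>
            if cellNB pc.2 then (true, PySem.Set.add q.2 pc.1) else q)
          (false, st.2)
        if inner.1 then (st.1 ++ [p.1], inner.2) else (st.1, inner.2))
      ([], PySem.Set.empty)
    if st.1.isEmpty then []
    else
      let keptCols := PySem.List.sorted st.2 (fun x => x)
      st.1.map (fun i =>
        keptCols.map (fun j =>
          if j < ((PySem.List.pyGetD grid i []).length : Int)
          then PySem.List.pyGetD (PySem.List.pyGetD grid i []) j "" else ""))

-- ===== PRECONDITION & SPEC =====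
def Spec_trim_grid (grid : List (List String)) (out : List (List String)) : Prop := out = trim_grid_alt grid
instance (grid : List (List String)) (out : List (List String)) : Decidable (Spec_trim_grid grid out) := by unfold Spec_trim_grid; infer_instance

-- ===== CLAIM (what is proved, stated in full; the proofs are below) =====
def Claim_equal_trim_grid : Prop := ∀ (grid : List (List String)), Dom_trim_grid grid → Spec_trim_grid grid (trim_grid grid)

-- ===== LEMMAS AND PROOFS =====

-- the column indices B's inner loop adds to the set, as a structural recursion
def addCols (s : PySem.Set Int) (k : Int) : List String → PySem.Set Int
  | [] => s
  | c :: cs => addCols (if cellNB c then PySem.Set.add s k else s) (k + 1) cs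

theorem pv_inner_eq (row : List String) : ∀ (k : Int) (b : Bool) (s : PySem.Set Int),
    (PySem.List.enumerate row k).foldl
      (fun (q : Bool × PySem.Set Int) pc =>
        if cellNB pc.2 then (true, PySem.Set.add q.2 pc.1) else q) (b, s)
    = (b || row.any cellNB, addCols s k row) := by
  induction row with
  | nil => intro k b s; simp [addCols]
  | cons c cs ih =>
    intro k b s
    rw [PySem.List.enumerate_cons, List.foldl_cons]
    cases hc : cellNB c <;> simp [hc, addCols, ih]

theorem pv_stepF_eq :
    (fun (st : List Int × PySem.Set Int) (p : Int × List String) =>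
        let inner := (PySem.List.enumerate p.2 0).foldl
          (fun (q : Bool × PySem.Set Int) pc =>
            if cellNB pc.2 then (true, PySem.Set.add q.2 pc.1) else q)
          (false, st.2)
        if inner.1 then (st.1 ++ [p.1], inner.2) else (st.1, inner.2))
    = fun st p => (if p.2.any cellNB then st.1 ++ [p.1] else st.1, addCols st.2 0 p.2) := by
  funext st p
  simp only [pv_inner_eq, Bool.false_or]
  cases h : p.2.any cellNB <;> simp

theorem pv_outer_eq (gs : List (List String)) : ∀ (k : Int) (acc : List Int) (s : PySem.Set Int),
    (PySem.List.enumerate gs k).foldl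
      (fun (st : List Int × PySem.Set Int) p =>
        (if p.2.any cellNB then st.1 ++ [p.1] else st.1, addCols st.2 0 p.2)) (acc, s)
    = (acc ++ ((PySem.List.enumerate gs k).filter (fun p => p.2.any cellNB)).map (fun p => p.1),
       gs.foldl (fun s' row => addCols s' 0 row) s) := by
  induction gs with
  | nil => intro k acc s; simp
  | cons g rest ih =>
    intro k acc s
    rw [PySem.List.enumerate_cons, List.foldl_cons]
    dsimp only
    cases hg : g.any cellNB
    · rw [if_neg (by simp : ¬(false = true)), ih]
      simp [hg]
    · rw [if_pos rfl, ih]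
      simp [hg]

theorem pv_mem_addCols (row : List String) : ∀ (s : PySem.Set Int) (k j : Int),
    j ∈ addCols s k row ↔
      j ∈ s ∨ ∃ t : Nat, t < row.length ∧ cellNB (row.getD t "") = true ∧ j = k + t := by
  induction row with
  | nil => intro s k j; simp [addCols]
  | cons c cs ih =>
    intro s k j
    rw [addCols, ih]
    constructor
    · rintro (hin | ⟨t, ht, hnb, rfl⟩)
      · by_cases hc : cellNB c = true
        · rw [if_pos hc] at hin
          rcases (PySem.Set.mem_add s k j).mp hin with hin | rfl
          · exact Or.inl hin
          · exact Or.inr ⟨0, by simp, by simpa using hc, by simp⟩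
        · rw [if_neg hc] at hin; exact Or.inl hin
      · refine Or.inr ⟨t + 1, by simp only [List.length_cons]; omega, by simpa using hnb, by push_cast; ring⟩
    · rintro (hin | ⟨t, ht, hnb, rfl⟩)
      · left
        by_cases hc : cellNB c = true
        · rw [if_pos hc]; exact (PySem.Set.mem_add s k j).mpr (Or.inl hin)
        · rw [if_neg hc]; exact hin
      · cases t with
        | zero =>
          left
          simp only [List.getD_cons_zero] at hnb
          rw [if_pos hnb]
          exact (PySem.Set.mem_add s k _).mpr (Or.inr (by simp))
        | succ t' =>
          right
          refine ⟨t', by simp only [List.length_cons] at ht; omega, by simpa using hnb, by push_cast; ring⟩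

theorem pv_nodup_addCols (row : List String) : ∀ (s : PySem.Set Int) (k : Int),
    s.Nodup → (addCols s k row).Nodup := by
  induction row with
  | nil => intro s k h; simpa [addCols] using h
  | cons c cs ih =>
    intro s k h
    rw [addCols]
    apply ih
    by_cases hc : cellNB c = true
    · rw [if_pos hc]; exact PySem.Set.nodup_add s k h
    · rw [if_neg hc]; exact h

theorem pv_mem_colSet (gs : List (List String)) : ∀ (s : PySem.Set Int) (j : Int),
    j ∈ gs.foldl (fun s' row => addCols s' 0 row) s ↔
      j ∈ s ∨ ∃ row ∈ gs, ∃ t : Nat, t < row.length ∧ cellNB (row.getD t "") = true ∧ j = t := by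
  induction gs with
  | nil => intro s j; simp
  | cons g rest ih =>
    intro s j
    rw [List.foldl_cons, ih]
    rw [pv_mem_addCols]
    constructor
    · rintro ((hin | ⟨t, ht, hnb, rfl⟩) | ⟨row, hrow, t, ht, hnb, rfl⟩)
      · exact Or.inl hin
      · exact Or.inr ⟨g, by simp, t, ht, hnb, by simp⟩
      · exact Or.inr ⟨row, by simp [hrow], t, ht, hnb, rfl⟩
    · rintro (hin | ⟨row, hrow, t, ht, hnb, rfl⟩)
      · exact Or.inl (Or.inl hin)
      · rcases List.mem_cons.mp hrow with rfl | hrow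
        · exact Or.inl (Or.inr ⟨t, ht, hnb, by simp⟩)
        · exact Or.inr ⟨row, hrow, t, ht, hnb, rfl⟩

theorem pv_nodup_colSet (gs : List (List String)) : ∀ (s : PySem.Set Int),
    s.Nodup → (gs.foldl (fun s' row => addCols s' 0 row) s).Nodup := by
  induction gs with
  | nil => intro s h; simpa using h
  | cons g rest ih => intro s h; exact ih _ (pv_nodup_addCols g s 0 h)

-- selecting rows of the original grid by the collected indices = filtering the rows
theorem pv_rowsel (F : List String → List String) : ∀ (gs pre : List (List String)),
    ((PySem.List.enumerate gs (pre.length : Int)).filter (fun p => p.2.any cellNB)).map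
      (fun p => F (PySem.List.pyGetD (pre ++ gs) p.1 []))
    = (gs.filter (fun r => r.any cellNB)).map F := by
  intro gs
  induction gs with
  | nil => intro pre; simp
  | cons g rest ih =>
    intro pre
    rw [PySem.List.enumerate_cons]
    have hget : PySem.List.pyGetD (pre ++ g :: rest) ((pre.length : Nat) : Int) [] = g := by
      rw [PySem.List.pyGetD_natCast, List.getD_eq_getElem?_getD,
          List.getElem?_append_right (Nat.le_refl _), Nat.sub_self]
      simp
    have hih := ih (pre ++ [g])
    have hcast : ((pre ++ [g]).length : Int) = (pre.length : Int) + 1 := by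
      simp
    rw [hcast] at hih
    have happ : (pre ++ [g]) ++ rest = pre ++ g :: rest := by simp
    rw [happ] at hih
    cases hg : g.any cellNB <;>
      simp [hg, hget, hih]

-- getD on a padded row
theorem pv_getD_pad (r : List String) (m n : Nat) :
    (r ++ List.replicate m "").getD n "" = if n < r.length then r.getD n "" else "" := by
  by_cases h : n < r.length
  · rw [if_pos h, List.getD_append _ _ _ _ h]
  · rw [if_neg h, List.getD_eq_getElem?_getD, List.getElem?_append_right (by omega)]
    rcases Nat.lt_or_ge (n - r.length) m with hlt | hge
    · simp [hlt]
    · rw [List.getElem?_eq_none (by simpa using hge)]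
      simp

-- indexing over range = direct traversal
theorem pv_anyIdx {α : Type} (xs : List α) (p : α → Bool) (d : α) :
    (List.range xs.length).any (fun i => p (xs.getD i d)) = xs.any p := by
  induction xs with
  | nil => simp
  | cons x t ih =>
    simp only [List.length_cons, List.range_succ_eq_map, List.any_cons, List.any_map]
    simp only [List.getD_cons_zero, Function.comp_def, Nat.succ_eq_add_one, List.getD_cons_succ]
    rw [ih]

theorem pv_getD_map {α β : Type} (xs : List α) (f : α → β) (i : Nat) (d : β) (d' : α)
    (h : i < xs.length) : (xs.map f).getD i d = f (xs.getD i d') := by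
  rw [List.getD_eq_getElem?_getD, List.getD_eq_getElem?_getD, List.getElem?_map,
      List.getElem?_eq_getElem h]
  simp

-- the enumerate-filter comprehension over a mapped range is filtering the range
theorem pv_keptIdx_aux (m : Nat) : ∀ (k : Nat) (f : Nat → Bool),
    ((((List.range' k m).map f).zipIdx k).filter (fun p => p.1)).map (fun p => p.2)
      = (List.range' k m).filter f := by
  induction m with
  | zero => intro k f; simp
  | succ n ih =>
    intro k f
    rw [List.range'_succ]
    simp only [List.map_cons, List.zipIdx_cons, List.filter_cons]
    cases hf : f k <;> simp [ih (k + 1) f]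

theorem pv_keptIdx (m : Nat) (f : Nat → Bool) :
    ((((List.range m).map f).zipIdx 0).filter (fun p => p.1)).map (fun p => p.2)
      = (List.range m).filter f := by
  rw [List.range_eq_range']
  exact pv_keptIdx_aux m 0 f

theorem pv_le_max (xs : List Nat) (x : Nat) (hx : x ∈ xs) : x ≤ xs.max?.getD 0 := by
  induction xs with
  | nil => cases hx
  | cons a t ih =>
    rw [List.max?_cons]
    simp only [Option.getD_some]
    rcases List.mem_cons.mp hx with rfl | hx
    · cases h : t.max? <;> simp [Option.elim]
    · have hxt := ih hx
      cases h : t.max? with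
      | none => rw [h] at hxt; simp at hxt; simp [Option.elim, hxt]
      | some b =>
        rw [h] at hxt
        simp only [Option.getD_some] at hxt
        exact le_trans hxt (by simp [Option.elim])

-- A's core after the padding: the mask/projection plus the trailing loop, which exits at once
theorem pv_A_core (rows2 : List (List String)) (maxc : Nat)
    (hne : rows2 ≠ [])
    (hrect : ∀ r ∈ rows2, r.length = maxc)
    (hany : ∀ r ∈ rows2, r.any (fun c => !(isBlank c)) = true) :
    (let nonEmptyCols := (List.range maxc).map
        (fun c => (List.range rows2.length).any (fun r => !(isBlank ((rows2.getD r []).getD c ""))));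
     let rows3 :=
        if nonEmptyCols.any id then
          let keptIdx := ((nonEmptyCols.zipIdx 0).filter (fun p => p.1)).map (fun p => p.2)
          rows2.map (fun row => keptIdx.map (fun i => row.getD i ""))
        else rows2
     trimLoopA (rows3.headD []).length rows3)
    = rows2.map (fun row =>
        ((List.range maxc).filter (fun c => rows2.any (fun r => !(isBlank (r.getD c ""))))).map
          (fun i => row.getD i "")) := by
  have hcols : (List.range maxc).map
        (fun c => (List.range rows2.length).any (fun r => !(isBlank ((rows2.getD r []).getD c ""))))
      = (List.range maxc).map (fun c => rows2.any (fun r => !(isBlank (r.getD c "")))) := by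
    apply List.map_congr_left
    intro c _
    exact pv_anyIdx rows2 (fun row => !(isBlank (row.getD c ""))) []
  simp only [hcols, pv_keptIdx]
  set P : Nat → Bool := fun c => rows2.any (fun r => !(isBlank (r.getD c ""))) with hP
  set kI : List Nat := (List.range maxc).filter P with hkI
  -- a witness column with a non-blank cell
  obtain ⟨r0, rest, hr0⟩ := List.exists_cons_of_ne_nil hne
  have hr0mem : r0 ∈ rows2 := by rw [hr0]; exact List.mem_cons_self
  obtain ⟨x0, hx0mem, hx0⟩ := List.any_eq_true.mp (hany r0 hr0mem)
  obtain ⟨i0, hi0lt, hi0⟩ := List.mem_iff_getElem.mp hx0mem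
  have hi0maxc : i0 < maxc := by rw [← hrect r0 hr0mem]; exact hi0lt
  have hgetD0 : r0.getD i0 "" = x0 := by
    rw [List.getD_eq_getElem?_getD, List.getElem?_eq_getElem hi0lt, hi0]; rfl
  have hPi0 : P i0 = true := by
    rw [hP]
    exact List.any_eq_true.mpr ⟨r0, hr0mem, by rw [hgetD0]; exact hx0⟩
  have hmask : ((List.range maxc).map P).any id = true :=
    List.any_eq_true.mpr ⟨P i0, List.mem_map.mpr ⟨i0, List.mem_range.mpr hi0maxc, rfl⟩, hPi0⟩
  rw [if_pos hmask]
  have hkIne : kI ≠ [] :=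
    List.ne_nil_of_mem (List.mem_filter.mpr ⟨List.mem_range.mpr hi0maxc, hPi0⟩)
  have hkIpos : 0 < kI.length := List.length_pos_iff.mpr hkIne
  set g : List String → List String := fun row => kI.map (fun i => row.getD i "") with hg
  -- the last kept column really has a non-blank cell, so the trailing loop stops at once
  set ilast : Nat := kI.getD (kI.length - 1) 0 with hilast
  have hilastmem : ilast ∈ kI := by
    rw [hilast, List.getD_eq_getElem?_getD, List.getElem?_eq_getElem (by omega)]
    exact List.getElem_mem _
  have hPlast : P ilast = true := (List.mem_filter.mp (hkI ▸ hilastmem)).2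
  obtain ⟨rl, hrlmem, hrl⟩ := List.any_eq_true.mp (hP ▸ hPlast)
  have hhead : (rows2.map g).headD [] = g r0 := by rw [hr0]; rfl
  have hgd : ∀ row : List String, (g row).getD ((g r0).length - 1) "" = row.getD ilast "" := by
    intro row
    have hlen : (g r0).length = kI.length := by rw [hg]; simp
    rw [hg, hlen]
    exact pv_getD_map kI (fun i => row.getD i "") (kI.length - 1) "" 0 (by omega)
  have hall : (rows2.map g).all
      (fun r => isBlank (r.getD (((rows2.map g).headD []).length - 1) "")) = false := by
    rw [List.all_eq_false]
    refine ⟨g rl, List.mem_map.mpr ⟨rl, hrlmem, rfl⟩, ?_⟩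
    rw [hhead, hgd rl]
    simp only [Bool.not_eq_true'] at hrl
    simp only [Bool.not_eq_true]
    exact hrl
  have hfuel : ((rows2.map g).headD []).length = (kI.length - 1) + 1 := by
    rw [hhead, hg]
    simp
    omega
  rw [hfuel, trimLoopA]
  have c1 : ¬(rows2.map g).isEmpty = true := by simp [hr0]
  have c2 : ¬((rows2.map g).headD []).isEmpty = true := by
    rw [hhead, hg]
    simp [hkIne]
  simp only [c1, c2, Bool.not_false, Bool.and_self, if_true, hall, Bool.false_eq_true]
  simp

-- B's padded projection of one row onto the kept columns
def pvFb (kC : List Int) (r : List String) : List String :=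
  kC.map (fun j => if j < (r.length : Int) then PySem.List.pyGetD r j "" else "")

theorem trim_grid_eq_alt (grid : List (List String)) : trim_grid grid = trim_grid_alt grid := by
  cases hgE : grid.isEmpty
  case true => simp [trim_grid, trim_grid_alt, hgE]
  case false =>
  have hnb : (fun c : String => !(isBlank c)) = cellNB := rfl
  simp only [trim_grid, trim_grid_alt, hgE, Bool.false_eq_true, if_false, hnb,
    pv_stepF_eq, pv_outer_eq, List.nil_append]
  set rows : List (List String) := grid.filter (fun r => r.any cellNB) with hrows
  set idxs : List Int :=
    ((PySem.List.enumerate grid 0).filter (fun p => p.2.any cellNB)).map (fun p => p.1) with hidxs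
  set S : PySem.Set Int := grid.foldl (fun s' row => addCols s' 0 row) PySem.Set.empty with hS
  have hsel : ∀ (F : List String → List String),
      idxs.map (fun i => F (PySem.List.pyGetD grid i [])) = rows.map F := by
    intro F
    have h := pv_rowsel F grid []
    simp only [List.nil_append, List.length_nil, Nat.cast_zero] at h
    rw [hidxs, List.map_map]
    exact h
  have hlen : idxs.length = rows.length := by
    have h := congrArg List.length (hsel id)
    simpa using h
  cases hrE : rows.isEmpty
  case true =>
    have hiE : idxs.isEmpty = true := by
      rw [List.isEmpty_iff, ← List.length_eq_zero_iff, hlen, List.length_eq_zero_iff,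
        ← List.isEmpty_iff]
      exact hrE
    simp only [hiE, if_true]
  case false =>
  have hiE : idxs.isEmpty = false := by
    cases h : idxs.isEmpty
    · rfl
    · rw [List.isEmpty_iff, ← List.length_eq_zero_iff, hlen, List.length_eq_zero_iff,
        ← List.isEmpty_iff] at h
      rw [h] at hrE; cases hrE
  simp only [hiE, Bool.false_eq_true, if_false]
  set maxc : Nat := ((rows.map List.length).max?).getD 0 with hmaxc
  set rows2 : List (List String) := rows.map (fun r => r ++ List.replicate (maxc - r.length) "")
    with hrows2
  have hrne : rows ≠ [] := by
    intro h; rw [h] at hrE; cases hrE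
  have h1 : rows2 ≠ [] := by simp [hrows2, hrne]
  have hlemax : ∀ r ∈ rows, r.length ≤ maxc := by
    intro r hr
    rw [hmaxc]
    exact pv_le_max _ _ (List.mem_map.mpr ⟨r, hr, rfl⟩)
  have h2 : ∀ r ∈ rows2, r.length = maxc := by
    intro r hrm
    obtain ⟨s, hs, rfl⟩ := List.mem_map.mp hrm
    have hle := hlemax s hs
    simp [List.length_append, List.length_replicate]
    omega
  have h3 : ∀ r ∈ rows2, r.any (fun c => !(isBlank c)) = true := by
    intro r hrm
    obtain ⟨s, hs, rfl⟩ := List.mem_map.mp hrm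
    have := (List.mem_filter.mp hs).2
    simp only [List.any_append]
    rw [show (fun c : String => !(isBlank c)) = cellNB from rfl, this]
    simp
  have hcore := pv_A_core rows2 maxc h1 h2 h3
  simp only [] at hcore
  rw [hcore]
  set P : Nat → Bool := fun c => rows2.any (fun r => !(isBlank (r.getD c ""))) with hP
  set kI : List Nat := (List.range maxc).filter P with hkI
  have hblank : isBlank "" = true := by decide
  have hmem : ∀ j : Int, j ∈ kI.map (fun n : Nat => (n : Int)) ↔ j ∈ S := by
    intro j
    rw [hS, pv_mem_colSet]
    constructor
    · intro hj
      obtain ⟨n, hn, rfl⟩ := List.mem_map.mp hj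
      obtain ⟨hnr, hPn⟩ := List.mem_filter.mp (hkI ▸ hn)
      obtain ⟨r2, hr2, hc⟩ := List.any_eq_true.mp hPn
      obtain ⟨r, hr, rfl⟩ := List.mem_map.mp (hrows2 ▸ hr2)
      rw [pv_getD_pad] at hc
      by_cases hlt : n < r.length
      · rw [if_pos hlt] at hc
        exact Or.inr ⟨r, List.mem_of_mem_filter hr, n, hlt, hc, rfl⟩
      · rw [if_neg hlt, hblank] at hc
        cases hc
    · rintro (h0 | ⟨row, hrow, t, ht, hcell, rfl⟩)
      · cases h0
      · have hmemel : row.getD t "" ∈ row := by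
          rw [List.getD_eq_getElem?_getD, List.getElem?_eq_getElem ht]
          simp
        have hrowrows : row ∈ rows := by
          rw [hrows]
          exact List.mem_filter.mpr ⟨hrow, List.any_eq_true.mpr ⟨row.getD t "", hmemel, hcell⟩⟩
        have htmax : t < maxc := lt_of_lt_of_le ht (hlemax row hrowrows)
        have hPt : P t = true := by
          rw [hP]
          apply List.any_eq_true.mpr
          refine ⟨row ++ List.replicate (maxc - row.length) "",
            hrows2 ▸ List.mem_map.mpr ⟨row, hrowrows, rfl⟩, ?_⟩
          rw [pv_getD_pad, if_pos ht]
          exact hcell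
        exact List.mem_map.mpr ⟨t, hkI ▸ List.mem_filter.mpr ⟨List.mem_range.mpr htmax, hPt⟩, rfl⟩
  have hnd1 : (kI.map (fun n : Nat => (n : Int))).Nodup := by
    apply List.Nodup.map Nat.cast_injective
    rw [hkI]
    exact (List.nodup_range).filter P
  have hnd2 : S.Nodup := pv_nodup_colSet grid PySem.Set.empty List.nodup_nil
  have hperm : (kI.map (fun n : Nat => (n : Int))).Perm S :=
    (List.perm_ext_iff_of_nodup hnd1 hnd2).mpr hmem
  have hpkI : kI.Pairwise (· < ·) := by
    rw [hkI]
    exact (List.pairwise_lt_range).filter P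
  have hpair : (kI.map (fun n : Nat => (n : Int))).Pairwise
      (fun a b => (fun x => x) a < (fun x => x) b) := by
    rw [List.pairwise_map]
    exact hpkI.imp (by intro a b h; show ((a : Int) < b); exact_mod_cast h)
  have hsorted : PySem.List.sorted S (fun x => x) = kI.map (fun n : Nat => (n : Int)) :=
    PySem.List.sorted_eq_of_perm_of_pairwise_lt S _ _ hperm hpair
  have hrow' : ∀ r ∈ rows,
      kI.map (fun i => (r ++ List.replicate (maxc - r.length) "").getD i "")
        = pvFb (kI.map (fun n : Nat => (n : Int))) r := by
    intro r _
    rw [pvFb, List.map_map]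
    apply List.map_congr_left
    intro n _
    simp only [Function.comp_apply, PySem.List.pyGetD_natCast, Nat.cast_lt]
    rw [pv_getD_pad]
  calc rows2.map (fun row => kI.map (fun i => row.getD i ""))
      = rows.map (fun r =>
          kI.map (fun i => (r ++ List.replicate (maxc - r.length) "").getD i "")) := by
        rw [hrows2, List.map_map]
        rfl
    _ = rows.map (pvFb (kI.map (fun n : Nat => (n : Int)))) := List.map_congr_left hrow'
    _ = idxs.map (fun i => pvFb (kI.map (fun n : Nat => (n : Int)))
          (PySem.List.pyGetD grid i [])) := (hsel _).symm
    _ = idxs.map (fun i =>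
          (PySem.List.sorted S (fun x => x)).map (fun j =>
            if j < ((PySem.List.pyGetD grid i []).length : Int)
            then PySem.List.pyGetD (PySem.List.pyGetD grid i []) j "" else "")) := by
        rw [hsorted]
        rfl

-- ===== VERDICT (by name: the statement is the Claim_ definition above) =====
theorem trim_grid_spec : Claim_equal_trim_grid := by
  intro grid _
  unfold Spec_trim_grid
  exact trim_grid_eq_alt grid
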